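-- pv_equiv track=rewrite | github.com/anuragkashyap302/Web-dev | JAVASCRIPT/PROJECTS/ccn.py | fragment_packet
-- ===== SOURCE A (Python) =====
-- def fragment_packet(payload, mtu):
--     header_size = 20
--     max_payload_per_packet = mtu - header_size
--     max_payload_per_packet = (max_payload_per_packet // 8) * 8
--
--     if max_payload_per_packet <= 0:
--         raise ValueError("MTU too small for IPv4 header")
--
--     if payload <= max_payload_per_packet:
--         return [payload]
--
--     fragments = []
--     remaining_payload = payload
--     offset = 0
--
--     while remaining_payload > max_payload_per_packet:
--         fragments.append(max_payload_per_packet)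
--         remaining_payload -= max_payload_per_packet
--         offset += max_payload_per_packet
--
--     if remaining_payload > 0:
--         fragments.append(remaining_payload)
--
--     return fragments
-- ===== SOURCE B (Python) =====
-- def fragment_packet(payload, mtu):
--     header_size = 20
--     max_payload_per_packet = mtu - header_size
--     max_payload_per_packet = (max_payload_per_packet // 8) * 8
--
--     if max_payload_per_packet <= 0:
--         raise ValueError("MTU too small for IPv4 header")
--
--     if payload <= max_payload_per_packet:
--         return [payload]
--
--     q, r = divmod(payload, max_payload_per_packet)
--     return [max_payload_per_packet] * q + ([r] if r else [])
-- ===== Notes on version B (the rewrite author's own statement) =====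
-- stated objective: simpler
-- what changed: The subtraction while-loop with offset bookkeeping is replaced by closed-form divmod: [max]*q plus the remainder if nonzero.
import Mathlib
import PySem

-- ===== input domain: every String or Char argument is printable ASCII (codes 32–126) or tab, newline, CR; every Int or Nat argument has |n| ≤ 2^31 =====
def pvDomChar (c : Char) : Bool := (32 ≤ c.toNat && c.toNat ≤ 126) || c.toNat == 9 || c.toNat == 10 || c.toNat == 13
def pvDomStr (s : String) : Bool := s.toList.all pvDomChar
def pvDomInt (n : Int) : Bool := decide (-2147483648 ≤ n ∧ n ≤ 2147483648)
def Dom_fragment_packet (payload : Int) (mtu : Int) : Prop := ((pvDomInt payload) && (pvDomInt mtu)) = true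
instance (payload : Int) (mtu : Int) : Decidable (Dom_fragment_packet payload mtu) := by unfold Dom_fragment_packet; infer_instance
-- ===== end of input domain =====

-- B replaces A's subtraction while-loop by closed-form divmod fragment construction (objective: simpler).

-- ===== PORT A =====
-- the while-loop of A: state (remaining_payload, fragments); the 0 < maxp conjunct only
-- makes the recursion total (A only enters the loop after the ValueError guard)
def fragLoopA (maxp : Int) (remaining : Int) (fragments : List Int) : List Int :=
  if h : 0 < maxp ∧ maxp < remaining then
    fragLoopA maxp (remaining - maxp) (fragments ++ [maxp])
  else if 0 < remaining then fragments ++ [remaining] else fragments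
termination_by remaining.toNat
decreasing_by omega

-- max_payload_per_packet = ((mtu - 20) // 8) * 8, shared header setup of both Pythons
def maxPayload (mtu : Int) : Int := (PySem.Int.floordiv (mtu - 20) 8) * 8

def fragment_packet (payload : Int) (mtu : Int) : List Int :=
  if maxPayload mtu ≤ 0 then []           -- raise ValueError: outside Pre_
  else if payload ≤ maxPayload mtu then [payload]
  else fragLoopA (maxPayload mtu) payload []

-- ===== PORT B =====
def fragment_packet_alt (payload : Int) (mtu : Int) : List Int :=
  if maxPayload mtu ≤ 0 then []           -- raise ValueError: outside Pre_
  else if payload ≤ maxPayload mtu then [payload]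
  else
    List.replicate (PySem.Int.floordiv payload (maxPayload mtu)).toNat (maxPayload mtu) ++
      (if PySem.Int.mod payload (maxPayload mtu) ≠ 0 then [PySem.Int.mod payload (maxPayload mtu)] else [])

-- ===== PRECONDITION & SPEC =====
-- Pre_ excludes exactly the inputs on which A raises ValueError: (mtu-20)//8*8 <= 0, i.e. mtu < 28.
def Pre_fragment_packet (payload : Int) (mtu : Int) : Prop := 28 ≤ mtu
instance (payload : Int) (mtu : Int) : Decidable (Pre_fragment_packet payload mtu) := by unfold Pre_fragment_packet; infer_instance
def pvWitness_fragment_packet : Int × Int := (100, 48)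

def Spec_fragment_packet (payload : Int) (mtu : Int) (out : List Int) : Prop := out = fragment_packet_alt payload mtu
instance (payload : Int) (mtu : Int) (out : List Int) : Decidable (Spec_fragment_packet payload mtu out) := by unfold Spec_fragment_packet; infer_instance

-- ===== CLAIM (what is proved, stated in full; the proofs are below) =====
def Claim_equal_fragment_packet : Prop := ∀ (payload : Int) (mtu : Int), Dom_fragment_packet payload mtu → Pre_fragment_packet payload mtu → Spec_fragment_packet payload mtu (fragment_packet payload mtu)

-- ===== LEMMAS AND PROOFS =====

-- the loop computes the closed-form divmod decomposition
theorem fragLoopA_eq (n : Nat) : ∀ (maxp p : Int), 0 < maxp → maxp < p → p.toNat ≤ n → ∀ acc : List Int,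
    fragLoopA maxp p acc =
      acc ++ List.replicate (p / maxp).toNat maxp ++ (if p % maxp ≠ 0 then [p % maxp] else []) := by
  induction n with
  | zero => intro maxp p hm hp hn; omega
  | succ n ih =>
    intro maxp p hm hp hn acc
    rw [fragLoopA]
    rw [dif_pos ⟨hm, hp⟩]
    have hpos : (0:Int) < p - maxp := by omega
    have key : p = (p - maxp) + maxp * 1 := by ring
    have hdiv : p / maxp = (p - maxp) / maxp + 1 := by
      conv_lhs => rw [key]
      rw [Int.add_mul_ediv_left _ _ (by omega : maxp ≠ 0)]
    have hmod : p % maxp = (p - maxp) % maxp := by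
      conv_lhs => rw [key]
      rw [Int.add_mul_emod_self_left]
    by_cases hc : maxp < p - maxp
    · rw [ih maxp (p - maxp) hm hc (by omega) (acc ++ [maxp])]
      have hq0 : 0 ≤ (p - maxp) / maxp := Int.ediv_nonneg (by omega) (by omega)
      have ht : (p / maxp).toNat = ((p - maxp) / maxp).toNat + 1 := by omega
      rw [ht, hmod, List.replicate_succ]
      simp
    · rw [fragLoopA]
      rw [dif_neg (by omega)]
      rw [if_pos hpos]
      by_cases he : p - maxp = maxp
      · -- p = 2 * maxp : exact multiple, no trailing remainder
        have h2 : p = 2 * maxp := by omega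
        have hd : p / maxp = 2 := by rw [h2, Int.mul_ediv_cancel _ (by omega)]
        have hm0 : p % maxp = 0 := by rw [h2, Int.mul_emod_left]
        rw [hd, hm0]
        simp [he, List.replicate_succ]
      · -- maxp < p < 2*maxp : one full fragment plus remainder p - maxp
        have hlt : p - maxp < maxp := by omega
        have hd : p / maxp = 1 := by
          rw [hdiv, Int.ediv_eq_zero_of_lt (by omega) hlt]
          norm_num
        have hm1 : p % maxp = p - maxp := by
          rw [hmod, Int.emod_eq_of_lt (by omega) hlt]
        have hne : p - maxp ≠ 0 := by omega
        rw [hd, hm1]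
        simp [hne]

-- ===== VERDICT (by name: the statement is the Claim_ definition above) =====
theorem fragment_packet_spec : Claim_equal_fragment_packet := by
  intro payload mtu _ hpre
  unfold Pre_fragment_packet at hpre
  unfold Spec_fragment_packet fragment_packet fragment_packet_alt
  have hm : 0 < maxPayload mtu := by
    unfold maxPayload
    rw [PySem.Int.floordiv_eq_ediv_of_pos (by omega : (0:Int) < 8)]
    have : 1 ≤ (mtu - 20) / 8 := by omega
    omega
  have hne0 : ¬ maxPayload mtu ≤ 0 := by omega
  rw [if_neg hne0]
  rw [if_neg hne0]
  by_cases hp : payload ≤ maxPayload mtu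
  · rw [if_pos hp]
    rw [if_pos hp]
  · rw [if_neg hp]
    rw [if_neg hp]
    rw [fragLoopA_eq payload.toNat (maxPayload mtu) payload hm (by omega) le_rfl []]
    rw [PySem.Int.floordiv_eq_ediv_of_pos hm, PySem.Int.mod_eq_emod_of_pos hm]
    simp
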